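-- pv_equiv track=rewrite | github.com/ciencia-de-los-datos/lab-01-python-basico-anfrestrepora | Testeos.py | asociar_letras_con_valor
-- ===== SOURCE A (Python) =====
-- def asociar_letras_con_valor(datos):
--     asociaciones = {}
--
--     # Iteramos sobre los datos para construir el diccionario de asociaciones
--     for fila in datos:
--         valor_col2 = fila[1]  # Valor de la columna 2
--         letra_col1 = fila[0]   # Letra de la columna 1
--
--         if valor_col2 not in asociaciones:
--             asociaciones[valor_col2] = [letra_col1]  # Creamos una nueva lista con la letra
--         else:
--             asociaciones[valor_col2].append(letra_col1)  # Agregamos la letra a la lista existente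
--
--     # Convertimos el diccionario a una lista de tuplas
--     lista_tuplas = sorted([(valor, letras) for valor, letras in asociaciones.items()], key=lambda x: x[0])
--
--     return lista_tuplas
-- ===== SOURCE B (Python) =====
-- def asociar_letras_con_valor(datos):
--     # sort-then-group: stable sort on the value column, then one pass collecting runs
--     ordenados = sorted(datos, key=lambda f: f[1])
--     resultado = []
--     i = 0
--     n = len(ordenados)
--     while i < n:
--         valor = ordenados[i][1]
--         letras = []
--         while i < n and ordenados[i][1] == valor:
--             letras.append(ordenados[i][0])
--             i += 1
--         resultado.append((valor, letras))
--     return resultado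
-- ===== Notes on version B (the rewrite author's own statement) =====
-- stated objective: alternative
-- what changed: Replaces the dict-accumulate-then-sort-items algorithm by a stable sort on the value column followed by a single run-collecting pass (sort-then-group instead of group-then-sort).
import Mathlib
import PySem

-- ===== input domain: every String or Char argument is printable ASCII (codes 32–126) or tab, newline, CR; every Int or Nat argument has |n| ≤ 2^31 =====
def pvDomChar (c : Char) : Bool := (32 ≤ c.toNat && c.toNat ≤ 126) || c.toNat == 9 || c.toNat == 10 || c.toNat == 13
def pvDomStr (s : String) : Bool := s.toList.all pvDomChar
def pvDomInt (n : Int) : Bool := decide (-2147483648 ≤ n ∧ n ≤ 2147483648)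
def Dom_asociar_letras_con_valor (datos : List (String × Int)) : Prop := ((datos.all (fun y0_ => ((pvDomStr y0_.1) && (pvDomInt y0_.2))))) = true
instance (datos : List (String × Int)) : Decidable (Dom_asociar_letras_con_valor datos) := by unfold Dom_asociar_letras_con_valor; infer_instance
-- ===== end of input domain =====

-- B replaces A's dict-accumulate-then-sort with a stable sort on the value column followed by
-- one run-collecting pass (sort-then-group instead of group-then-sort); equal output, similar cost.


-- ===== PORT A =====
def asociar_letras_con_valor (datos : List (String × Int)) : List (Int × List String) :=
  let asociaciones : PySem.Dict Int (List String) := datos.foldl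
    (fun d fila =>
      let valor_col2 := fila.2
      let letra_col1 := fila.1
      if d.contains valor_col2 = false then d.insert valor_col2 [letra_col1]
      else d.modify valor_col2 [] (fun ls => ls ++ [letra_col1]))
    PySem.Dict.empty
  PySem.List.sorted (asociaciones.items.map (fun p => (p.1, p.2))) (fun x => x.1) false

-- ===== PORT B =====
-- the outer while loop of Source B: each iteration takes one run of equal values off the front
def pvAgrupar : List (String × Int) → List (Int × List String)
  | [] => []
  | (l, v) :: t =>
      (v, l :: (t.takeWhile (fun f => f.2 == v)).map (fun f => f.1)) ::
        pvAgrupar (t.dropWhile (fun f => f.2 == v))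
termination_by s => s.length
decreasing_by
  exact Nat.lt_succ_of_le (List.length_dropWhile_le _ _)

def asociar_letras_con_valor_alt (datos : List (String × Int)) : List (Int × List String) :=
  pvAgrupar (PySem.List.sorted datos (fun f => f.2) false)

-- ===== PRECONDITION & SPEC =====
def Spec_asociar_letras_con_valor (datos : List (String × Int)) (out : List (Int × List String)) : Prop := out = asociar_letras_con_valor_alt datos
instance (datos : List (String × Int)) (out : List (Int × List String)) : Decidable (Spec_asociar_letras_con_valor datos out) := by unfold Spec_asociar_letras_con_valor; infer_instance

-- ===== CLAIM (what is proved, stated in full; the proofs are below) =====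
def Claim_equal_asociar_letras_con_valor : Prop := ∀ (datos : List (String × Int)), Dom_asociar_letras_con_valor datos → Spec_asociar_letras_con_valor datos (asociar_letras_con_valor datos)

-- ===== LEMMAS AND PROOFS =====

-- the group of letters with a given value, in original order
def pvGrupo (datos : List (String × Int)) (k : Int) : List String :=
  (datos.filter (fun f => f.2 == k)).map (fun f => f.1)

-- the common canonical form: distinct values sorted ascending, each with its group
def pvCanon (datos : List (String × Int)) : List (Int × List String) :=
  (PySem.List.sorted (PySem.Set.ofList (datos.map (fun f => f.2))) (fun x => x) false).map
    (fun k => (k, pvGrupo datos k))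

lemma pv_ofList_sublist {α : Type} [BEq α] (xs : List α) :
    (PySem.Set.ofList xs).Sublist xs := by
  induction xs using List.reverseRecOn with
  | nil => simp [PySem.Set.ofList, PySem.Set.empty]
  | append_singleton l x ih =>
      show (List.foldl PySem.Set.add PySem.Set.empty (l ++ [x])).Sublist (l ++ [x])
      rw [List.foldl_append]
      simp only [List.foldl]
      unfold PySem.Set.add
      split
      · exact ih.trans (List.sublist_append_left l [x])
      · exact List.Sublist.append ih (List.Sublist.refl [x])

lemma pv_pairwise_lt_ofList (m : List Int) (h : m.Pairwise (· ≤ ·)) :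
    (PySem.Set.ofList m).Pairwise (· < ·) := by
  have hle : (PySem.Set.ofList m).Pairwise (· ≤ ·) :=
    List.Pairwise.sublist (pv_ofList_sublist m) h
  have hnd : (PySem.Set.ofList m).Nodup := PySem.Set.nodup_ofList m
  exact (hle.and hnd).imp (fun hab => lt_of_le_of_ne hab.1 hab.2)

lemma pv_dropWhile_head_not {α : Type} (p : α → Bool) (l : List α) (x : α) (xs : List α)
    (h : l.dropWhile p = x :: xs) : p x = false := by
  induction l with
  | nil => simp at h
  | cons a t ih =>
      rw [List.dropWhile_cons] at h
      split at h
      · exact ih h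
      · rename_i ha
        obtain ⟨rfl, rfl⟩ := List.cons.injEq .. ▸ h
        simpa using ha

-- on a value-sorted tail, everything the run-taker drops has a strictly larger value
lemma pv_rest_gt (v : Int) (t : List (String × Int))
    (hst : ∀ f ∈ t, v ≤ f.2) (htp : t.Pairwise (fun a b => a.2 ≤ b.2)) :
    ∀ f ∈ t.dropWhile (fun f => f.2 == v), v < f.2 := by
  cases hr : t.dropWhile (fun f => f.2 == v) with
  | nil => intro f hf; simp at hf
  | cons r rt =>
      have hpr : ((fun f : String × Int => f.2 == v) r) = false :=
        pv_dropWhile_head_not _ t r rt hr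
      have hsub : (r :: rt).Sublist t := hr ▸ List.dropWhile_sublist _
      have hrr : v < r.2 := by
        have hle := hst r (hsub.mem (by simp))
        have hne : r.2 ≠ v := by simpa using hpr
        exact lt_of_le_of_ne hle (fun h => hne h.symm)
      have hrp : (r :: rt).Pairwise (fun a b => a.2 ≤ b.2) := htp.sublist hsub
      intro f hf
      rcases List.mem_cons.mp hf with rfl | hf'
      · exact hrr
      · exact lt_of_lt_of_le hrr ((List.pairwise_cons.mp hrp).1 f hf')

-- foldl add over elements not equal to v keeps a leading v in place
lemma pv_foldl_add_cons (v : Int) (s : List Int) (m : List Int) (hm : ∀ x ∈ m, x ≠ v) :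
    List.foldl PySem.Set.add (v :: s) m = v :: List.foldl PySem.Set.add s m := by
  induction m generalizing s with
  | nil => rfl
  | cons a t ih =>
      have ha : a ≠ v := hm a (by simp)
      have hstep : PySem.Set.add (v :: s) a = v :: PySem.Set.add s a := by
        unfold PySem.Set.add PySem.Set.contains
        simp only [List.contains_cons]
        rw [show (a == v) = false from beq_eq_false_iff_ne.mpr ha]
        simp only [Bool.false_or]
        split <;> simp
      rw [List.foldl_cons, hstep, List.foldl_cons, ih _ (fun x hx => hm x (by simp [hx]))]

-- dedup of v :: (all-v run) ++ (no-v rest) is v :: dedup rest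
lemma pv_ofList_run (v : Int) (m₁ m₂ : List Int)
    (h1 : ∀ x ∈ m₁, x = v) (h2 : ∀ x ∈ m₂, x ≠ v) :
    PySem.Set.ofList (v :: m₁ ++ m₂) = v :: PySem.Set.ofList m₂ := by
  unfold PySem.Set.ofList
  have hadd : PySem.Set.add (PySem.Set.empty : PySem.Set Int) v = [v] := by
    simp [PySem.Set.add, PySem.Set.contains, PySem.Set.empty]
  rw [List.cons_append, List.foldl_cons, hadd, List.foldl_append]
  have h₁ : List.foldl PySem.Set.add [v] m₁ = [v] := by
    induction m₁ with
    | nil => rfl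
    | cons a t ih =>
        have hav : a = v := h1 a (by simp)
        subst hav
        have hone : PySem.Set.add [a] a = [a] := by simp [PySem.Set.add, PySem.Set.contains]
        rw [List.foldl_cons, hone, ih (fun x hx => h1 x (by simp [hx]))]
  rw [h₁, pv_foldl_add_cons v [] m₂ h2]
  rfl

-- B's grouping pass on a value-sorted list produces the canonical groups of that list
lemma pv_agrupar_eq (n : Nat) :
    ∀ (s : List (String × Int)), s.length ≤ n → s.Pairwise (fun a b => a.2 ≤ b.2) →
      pvAgrupar s = (PySem.Set.ofList (s.map (fun f => f.2))).map (fun k => (k, pvGrupo s k)) := by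
  induction n with
  | zero =>
      intro s hlen _
      have hnil : s = [] := List.eq_nil_of_length_eq_zero (Nat.le_zero.mp hlen)
      subst hnil
      rw [pvAgrupar]
      rfl
  | succ n ih =>
      intro s hlen hs
      match s with
      | [] => rw [pvAgrupar]; rfl
      | (l, v) :: t =>
        have hst : ∀ f ∈ t, v ≤ f.2 := (List.pairwise_cons.mp hs).1
        have htp : t.Pairwise (fun a b => a.2 ≤ b.2) := (List.pairwise_cons.mp hs).2
        have hrunv : ∀ f ∈ t.takeWhile (fun f => f.2 == v), f.2 = v := fun f hf =>
          beq_iff_eq.mp (List.mem_takeWhile_imp (p := fun f : String × Int => f.2 == v) hf)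
        have hrestv : ∀ f ∈ t.dropWhile (fun f => f.2 == v), v < f.2 := pv_rest_gt v t hst htp
        have hrestp : (t.dropWhile (fun f => f.2 == v)).Pairwise (fun a b => a.2 ≤ b.2) :=
          htp.sublist (List.dropWhile_sublist _)
        have hlen' : (t.dropWhile (fun f => f.2 == v)).length ≤ n := by
          have hd := List.length_dropWhile_le (fun f : String × Int => f.2 == v) t
          simp only [List.length_cons] at hlen
          omega
        have hIH := ih _ hlen' hrestp
        have htd : t.takeWhile (fun f => f.2 == v) ++ t.dropWhile (fun f => f.2 == v) = t :=
          List.takeWhile_append_dropWhile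
        rw [pvAgrupar]
        have hkeys : PySem.Set.ofList (((l, v) :: t).map (fun f => f.2))
            = v :: PySem.Set.ofList ((t.dropWhile (fun f => f.2 == v)).map (fun f => f.2)) := by
          have hsplit : ((l, v) :: t).map (fun f => f.2)
              = v :: (t.takeWhile (fun f => f.2 == v)).map (fun f => f.2)
                  ++ (t.dropWhile (fun f => f.2 == v)).map (fun f => f.2) := by
            simp only [List.map_cons, List.cons_append]
            rw [← List.map_append, htd]
          rw [hsplit]
          apply pv_ofList_run
          · intro x hx
            obtain ⟨f, hf, rfl⟩ := List.mem_map.mp hx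
            exact hrunv f hf
          · intro x hx
            obtain ⟨f, hf, rfl⟩ := List.mem_map.mp hx
            simpa using ne_of_gt (hrestv f hf)
        rw [hkeys, List.map_cons, hIH]
        congr 1
        · -- head group: the letter in front plus the run, in order
          have hg : pvGrupo ((l, v) :: t) v
              = l :: (t.takeWhile (fun f => f.2 == v)).map (fun f => f.1) := by
            unfold pvGrupo
            conv_lhs => rw [← htd]
            simp only [List.filter_cons, List.filter_append]
            rw [List.filter_eq_self.mpr (fun f hf => by simp [hrunv f hf]),
                List.filter_eq_nil_iff.mpr (fun f hf => by
                  simpa using ne_of_gt (hrestv f hf))]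
            simp
          rw [hg]
        · -- tail groups: values strictly above v ignore the front run
          apply List.map_congr_left
          intro k hk
          have hkrest : v < k := by
            have hmem := (PySem.Set.mem_ofList _ k).mp hk
            obtain ⟨f, hf, rfl⟩ := List.mem_map.mp hmem
            exact hrestv f hf
          have hgr : pvGrupo ((l, v) :: t) k = pvGrupo (t.dropWhile (fun f => f.2 == v)) k := by
            unfold pvGrupo
            conv_lhs => rw [← htd]
            simp only [List.filter_cons, List.filter_append]
            rw [List.filter_eq_nil_iff.mpr (fun f hf => by
              rw [show f.2 = v from hrunv f hf]
              simpa using ne_of_lt hkrest)]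
            simp [beq_eq_false_iff_ne.mpr (ne_of_lt hkrest)]
          rw [hgr]

-- stability of PySem's sort: filtering one value class gives the original order
lemma pv_filter_insertBy (k : Int) (x : String × Int) (ys : List (String × Int))
    (hys : ys.Pairwise (fun a b => a.2 ≤ b.2)) :
    (PySem.List.insertBy (fun a b => decide (a.2 < b.2)) x ys).filter (fun f => f.2 == k)
      = ys.filter (fun f => f.2 == k) ++ (if x.2 == k then [x] else []) := by
  induction ys with
  | nil =>
      rw [PySem.List.insertBy]
      by_cases hx : (x.2 == k) = true <;> simp [hx]
  | cons y ys ih =>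
      rw [PySem.List.insertBy]
      split
      · rename_i hlt
        have hxy : x.2 < y.2 := of_decide_eq_true hlt
        have hrest : ∀ f ∈ y :: ys, x.2 < f.2 := by
          intro f hf
          rcases List.mem_cons.mp hf with rfl | hf'
          · exact hxy
          · exact lt_of_lt_of_le hxy ((List.pairwise_cons.mp hys).1 f hf')
        by_cases hxk : x.2 = k
        · have hnone : (y :: ys).filter (fun f => f.2 == k) = [] :=
            List.filter_eq_nil_iff.mpr (fun f hf => by
              simpa using (ne_of_lt (hxk ▸ hrest f hf)).symm)
          simp [hxk, hnone]
        · simp [List.filter_cons, beq_eq_false_iff_ne.mpr hxk]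
      · have hys' : ys.Pairwise (fun a b => a.2 ≤ b.2) := (List.pairwise_cons.mp hys).2
        simp only [List.filter_cons]
        rw [ih hys']
        by_cases hy : (y.2 == k) = true <;> simp [hy]

lemma pv_filter_sorted (l : List (String × Int)) (k : Int) :
    (PySem.List.sorted l (fun f => f.2) false).filter (fun f => f.2 == k)
      = l.filter (fun f => f.2 == k) := by
  induction l using List.reverseRecOn with
  | nil => rfl
  | append_singleton l x ih =>
      rw [PySem.List.sorted_eq_foldl_insertBy, List.foldl_append, List.foldl_cons, List.foldl_nil,
          ← PySem.List.sorted_eq_foldl_insertBy]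
      rw [pv_filter_insertBy k x _ (PySem.List.sorted_pairwise l (fun f => f.2)), ih,
          List.filter_append]
      by_cases hx : (x.2 == k) = true <;> simp [hx]

-- B equals the canonical form
lemma pv_alt_eq_canon (datos : List (String × Int)) :
    asociar_letras_con_valor_alt datos = pvCanon datos := by
  unfold asociar_letras_con_valor_alt pvCanon
  have hs : (PySem.List.sorted datos (fun f => f.2) false).Pairwise (fun a b => a.2 ≤ b.2) :=
    PySem.List.sorted_pairwise datos (fun f => f.2)
  rw [pv_agrupar_eq (PySem.List.sorted datos (fun f => f.2) false).length _ (le_refl _) hs]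
  have hkeys : PySem.List.sorted (PySem.Set.ofList (datos.map (fun f => f.2))) (fun x => x) false
      = PySem.Set.ofList ((PySem.List.sorted datos (fun f => f.2) false).map (fun f => f.2)) := by
    apply PySem.List.sorted_eq_of_perm_of_pairwise_lt
    · apply (List.perm_ext_iff_of_nodup (PySem.Set.nodup_ofList _) (PySem.Set.nodup_ofList _)).mpr
      intro a
      rw [PySem.Set.mem_ofList, PySem.Set.mem_ofList]
      constructor
      · intro ha
        obtain ⟨f, hf, rfl⟩ := List.mem_map.mp ha
        exact List.mem_map.mpr
          ⟨f, (PySem.List.sorted_perm datos (fun f => f.2) false).mem_iff.mp hf, rfl⟩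
      · intro ha
        obtain ⟨f, hf, rfl⟩ := List.mem_map.mp ha
        exact List.mem_map.mpr
          ⟨f, (PySem.List.sorted_perm datos (fun f => f.2) false).mem_iff.mpr hf, rfl⟩
    · exact pv_pairwise_lt_ofList _ (by rw [List.pairwise_map]; exact hs)
  rw [← hkeys]
  apply List.map_congr_left
  intro k _
  have hg : pvGrupo (PySem.List.sorted datos (fun f => f.2) false) k = pvGrupo datos k := by
    unfold pvGrupo
    rw [pv_filter_sorted]
  rw [hg]

-- A equals the canonical form
lemma pv_a_eq_canon (datos : List (String × Int)) :
    asociar_letras_con_valor datos = pvCanon datos := by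
  show PySem.List.sorted
      ((datos.foldl
        (fun (d : PySem.Dict Int (List String)) (fila : String × Int) =>
          if d.contains fila.2 = false then d.insert fila.2 [fila.1]
          else d.modify fila.2 [] (fun ls => ls ++ [fila.1]))
        PySem.Dict.empty).items.map (fun p => (p.1, p.2))) (fun x => x.1) false
      = pvCanon datos
  have hbody : (fun (d : PySem.Dict Int (List String)) (fila : String × Int) =>
      if d.contains fila.2 = false then d.insert fila.2 [fila.1]
      else d.modify fila.2 [] (fun ls => ls ++ [fila.1]))
      = (fun (d : PySem.Dict Int (List String)) (fila : String × Int) =>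
          d.modify fila.2 [] (fun ls => ls ++ [fila.1])) := by
    funext d p
    by_cases h : d.contains p.2
    · simp [h]
    · simp only [Bool.not_eq_true] at h
      simp [h, PySem.Dict.modify, PySem.Dict.getD_of_not_contains d ([] : List String) h]
  rw [hbody]
  have hswap : datos.foldl
      (fun (d : PySem.Dict Int (List String)) (fila : String × Int) =>
        d.modify fila.2 [] (fun ls => ls ++ [fila.1])) PySem.Dict.empty
      = (datos.map (fun p => (p.2, p.1))).foldl
          (fun (d : PySem.Dict Int (List String)) (q : Int × String) =>
            d.modify q.1 [] (fun ls => ls ++ [q.2])) PySem.Dict.empty := by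
    rw [List.foldl_map]
  rw [hswap]
  have hkeysD : ((datos.map (fun p => (p.2, p.1))).foldl
      (fun (d : PySem.Dict Int (List String)) (q : Int × String) =>
        d.modify q.1 [] (fun ls => ls ++ [q.2])) PySem.Dict.empty).keys
      = PySem.Set.ofList (datos.map (fun f => f.2)) := by
    have h := PySem.Dict.keys_foldl_modify_key (κ := Int) (ν := List String)
      (datos.map (fun p => (p.2, p.1))) (fun q => q.1) ([] : List String)
      (fun _ q => fun ls => ls ++ [q.2]) PySem.Dict.empty
    simp only [PySem.Dict.keys_empty, List.map_map] at h
    exact h.trans (by rfl)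
  have hnd : ((datos.map (fun p => (p.2, p.1))).foldl
      (fun (d : PySem.Dict Int (List String)) (q : Int × String) =>
        d.modify q.1 [] (fun ls => ls ++ [q.2])) PySem.Dict.empty).keys.Nodup := by
    rw [hkeysD]; exact PySem.Set.nodup_ofList _
  have hget : ∀ k : Int, ((datos.map (fun p => (p.2, p.1))).foldl
      (fun (d : PySem.Dict Int (List String)) (q : Int × String) =>
        d.modify q.1 [] (fun ls => ls ++ [q.2])) PySem.Dict.empty).getD k []
      = pvGrupo datos k := by
    intro k
    have h := PySem.Dict.getD_foldl_modify_append (datos.map (fun p => (p.2, p.1)))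
      (PySem.Dict.empty : PySem.Dict Int (List String)) k
    rw [PySem.Dict.getD_empty, List.nil_append, List.filter_map, List.map_map] at h
    exact h.trans (by rfl)
  have hitems : ((datos.map (fun p => (p.2, p.1))).foldl
      (fun (d : PySem.Dict Int (List String)) (q : Int × String) =>
        d.modify q.1 [] (fun ls => ls ++ [q.2])) PySem.Dict.empty).items
      = (PySem.Set.ofList (datos.map (fun f => f.2))).map (fun k => (k, pvGrupo datos k)) := by
    rw [PySem.Dict.items_eq_map_keys _ hnd ([] : List String), hkeysD]
    exact List.map_congr_left (fun k _ => by rw [hget k])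
  rw [hitems, List.map_map]
  have hid : ((fun p : Int × List String => (p.1, p.2)) ∘ fun k => (k, pvGrupo datos k))
      = fun k => (k, pvGrupo datos k) := rfl
  rw [hid]
  unfold pvCanon
  apply PySem.List.sorted_eq_of_perm_of_pairwise_lt
  · exact (PySem.List.sorted_perm _ _ _).map _
  · rw [List.pairwise_map]
    simpa using PySem.List.sorted_ofList_pairwise_lt (datos.map (fun f => f.2))

-- ===== VERDICT (by name: the statement is the Claim_ definition above) =====
theorem asociar_letras_con_valor_spec : Claim_equal_asociar_letras_con_valor := by
  intro datos _
  unfold Spec_asociar_letras_con_valor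
  rw [pv_a_eq_canon, pv_alt_eq_canon]
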